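-- pv_equiv track=rewrite | github.com/ezequiasOR/Exercicios-LP1 | unidade6/altera_consecutivos.py | inverte2a2
-- ===== SOURCE A (Python) =====
-- def inverte2a2(seq):
-- 	if len(seq) % 2 == 0:
-- 		for i in range(0, len(seq)-1, 2):
-- 			seq[i], seq[i+1] = seq[i+1], seq[i]
--
-- 	else:
-- 		for i in range(0, len(seq)-2, 2):
-- 			seq[i], seq[i+1] = seq[i+1], seq[i]
--
-- 	return seq
-- ===== SOURCE B (Python) =====
-- def inverte2a2(seq):
--     out = []
--     pending = None
--     for x in seq:
--         if pending is None:
--             pending = x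
--         else:
--             out.append(x)
--             out.append(pending)
--             pending = None
--     if pending is not None:
--         out.append(pending)
--     seq[:] = out
--     return seq
-- ===== Notes on version B (the rewrite author's own statement) =====
-- stated objective: alternative
-- what changed: Replaces the parity branch and index loop doing in-place pairwise swaps with a single value-driven pass that folds over the elements with a one-element 'pending' buffer, emitting each pair swapped and appending a leftover odd element.
import Mathlib
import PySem

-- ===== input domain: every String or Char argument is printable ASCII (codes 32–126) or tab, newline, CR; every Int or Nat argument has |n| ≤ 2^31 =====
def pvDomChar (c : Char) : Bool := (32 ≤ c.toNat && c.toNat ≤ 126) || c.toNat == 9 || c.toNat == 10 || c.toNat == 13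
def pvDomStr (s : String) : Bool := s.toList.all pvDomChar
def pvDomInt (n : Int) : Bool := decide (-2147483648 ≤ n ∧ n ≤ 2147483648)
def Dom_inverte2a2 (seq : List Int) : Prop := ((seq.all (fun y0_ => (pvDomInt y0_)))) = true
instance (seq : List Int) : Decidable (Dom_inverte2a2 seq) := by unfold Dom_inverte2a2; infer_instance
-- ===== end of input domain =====

-- B replaces A's parity branch + index loop of in-place swaps with a single fold
-- carrying a one-element pending buffer (alternative decomposition, same cost);
-- both update seq in place to the same contents, equivalence proved on return values.


-- ===== PORT A =====
-- 'seq[i], seq[i+1] = seq[i+1], seq[i]': read both (always in range in A's loops), write both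
def swapAt (s : List Int) (i : Int) : List Int :=
  match PySem.List.pyGet? s i, PySem.List.pyGet? s (i + 1) with
  | some x, some y => (s.set i.toNat y).set (i + 1).toNat x
  | _, _ => s

def inverte2a2 (seq : List Int) : List Int :=
  if (seq.length : Int) % 2 == 0 then
    (PySem.List.pyRange 0 ((seq.length : Int) - 1) 2).foldl swapAt seq
  else
    (PySem.List.pyRange 0 ((seq.length : Int) - 2) 2).foldl swapAt seq

-- ===== PORT B =====
-- the loop body of Source B: state = (out, pending)
def altStep (st : List Int × Option Int) (x : Int) : List Int × Option Int :=
  match st.2 with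
  | none => (st.1, some x)
  | some p => (st.1 ++ [x, p], none)

def inverte2a2_alt (seq : List Int) : List Int :=
  let st := seq.foldl altStep ([], none)
  match st.2 with
  | some p => st.1 ++ [p]
  | none => st.1

-- ===== PRECONDITION & SPEC =====
def Spec_inverte2a2 (seq : List Int) (out : List Int) : Prop := out = inverte2a2_alt seq
instance (seq : List Int) (out : List Int) : Decidable (Spec_inverte2a2 seq out) := by unfold Spec_inverte2a2; infer_instance

-- ===== CLAIM (what is proved, stated in full; the proofs are below) =====
def Claim_equal_inverte2a2 : Prop := ∀ (seq : List Int), Dom_inverte2a2 seq → Spec_inverte2a2 seq (inverte2a2 seq)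

-- ===== LEMMAS AND PROOFS =====

-- structural specification: swap the elements of each consecutive pair
def pairSwap : List Int → List Int
  | a :: b :: r => b :: a :: pairSwap r
  | s => s

-- B's loop result, computed structurally two elements at a time
def ps : List Int → List Int × Option Int
  | a :: b :: r => (b :: a :: (ps r).1, (ps r).2)
  | [a] => ([], some a)
  | [] => ([], none)

-- the index list A's loops iterate over, as casts of naturals
def idxs (t : Nat) : List Int := (List.range t).map (fun k => ((2 * k : Nat) : Int))

theorem swapAt_zero (a b : Int) (s : List Int) : swapAt (a :: b :: s) 0 = b :: a :: s := by
  have hc : (0:Int) ≤ (s.length : Int) + 1 := by positivity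
  simp [swapAt, PySem.List.pyGet?, PySem.List.pyIdx?, hc]

theorem swapAt_shift (i : Nat) (x y : Int) (s : List Int) :
    swapAt (x :: y :: s) ((i : Int) + 2) = x :: y :: swapAt s i := by
  have g1 : PySem.List.pyGet? (x :: y :: s) ((i : Int) + 2) = s[i]? := by
    rw [show ((i:Int)+2) = ((i+2:Nat):Int) by push_cast; ring, PySem.List.pyGet?_natCast]
    simp [show i+2 = (i+1)+1 from rfl]
  have g2 : PySem.List.pyGet? (x :: y :: s) ((i : Int) + 2 + 1) = s[i+1]? := by
    rw [show ((i:Int)+2+1) = ((i+3:Nat):Int) by push_cast; ring, PySem.List.pyGet?_natCast]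
    simp [show i+3 = ((i+1)+1)+1 from rfl]
  have g3 : PySem.List.pyGet? s ((i : Int)) = s[i]? := PySem.List.pyGet?_natCast ..
  have g4 : PySem.List.pyGet? s ((i : Int) + 1) = s[i+1]? := by
    rw [show ((i:Int)+1) = ((i+1:Nat):Int) by push_cast; ring, PySem.List.pyGet?_natCast]
  have t1 : ((i:Int)+2).toNat = (i+1)+1 := by omega
  have t2 : ((i:Int)+2+1).toNat = ((i+1)+1)+1 := by omega
  have t3 : ((i:Int)).toNat = i := by omega
  have t4 : ((i:Int)+1).toNat = i+1 := by omega
  unfold swapAt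
  rw [g1, g2, g3, g4, t1, t2, t3, t4]
  cases hx : s[i]? <;> cases hy : s[i+1]? <;> simp

theorem foldl_shift (l : List Nat) : ∀ (s : List Int) (x y : Int),
    (l.map (fun k => ((2 * k + 2 : Nat) : Int))).foldl swapAt (x :: y :: s)
      = x :: y :: (l.map (fun k => ((2 * k : Nat) : Int))).foldl swapAt s := by
  induction l with
  | nil => intro s x y; simp
  | cons k t ih =>
    intro s x y
    have hk : ((2 * k + 2 : Nat) : Int) = ((2 * k : Nat) : Int) + 2 := by push_cast; ring
    simp only [List.map_cons, List.foldl_cons, hk, swapAt_shift, ih]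

theorem key : ∀ (s : List Int), (idxs (s.length / 2)).foldl swapAt s = pairSwap s := by
  intro s
  match s with
  | [] => simp [pairSwap, idxs]
  | [a] => simp [pairSwap, idxs]
  | a :: b :: r =>
    have ih := key r
    have hlen : (a :: b :: r).length / 2 = r.length / 2 + 1 := by simp; omega
    have hmap : idxs (r.length / 2 + 1)
        = 0 :: (List.range (r.length / 2)).map (fun k => ((2 * k + 2 : Nat) : Int)) := by
      unfold idxs
      rw [List.range_succ_eq_map, List.map_cons, List.map_map]
      refine congrArg₂ List.cons (by norm_num) ?_
      apply List.map_congr_left; intro k _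
      simp only [Function.comp_apply, Nat.succ_eq_add_one]
      push_cast; ring
    rw [hlen, hmap, List.foldl_cons, swapAt_zero, foldl_shift]
    rw [show (List.range (r.length / 2)).map (fun k => ((2 * k : Nat) : Int)) = idxs (r.length / 2) from rfl]
    rw [ih, pairSwap]
termination_by s => s.length

theorem rangeA (n : Nat) (h : n % 2 = 0) :
    PySem.List.pyRange 0 ((n : Int) - 1) 2 = idxs (n / 2) := by
  rw [PySem.List.pyRange_of_pos _ _ (by norm_num)]
  have hcnt : (if (0:Int) < (n:Int) - 1 then (((n:Int) - 1 - 0 + 2 - 1) / 2).toNat else 0) = n / 2 := by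
    split_ifs with hc <;> omega
  rw [hcnt]
  unfold idxs; apply List.map_congr_left; intro k _; push_cast; ring

theorem rangeB (n : Nat) (h : n % 2 = 1) :
    PySem.List.pyRange 0 ((n : Int) - 2) 2 = idxs (n / 2) := by
  rw [PySem.List.pyRange_of_pos _ _ (by norm_num)]
  have hcnt : (if (0:Int) < (n:Int) - 2 then (((n:Int) - 2 - 0 + 2 - 1) / 2).toNat else 0) = n / 2 := by
    split_ifs with hc <;> omega
  rw [hcnt]
  unfold idxs; apply List.map_congr_left; intro k _; push_cast; ring

theorem alt_step_lemma : ∀ (s : List Int) (acc : List Int),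
    s.foldl altStep (acc, none) = (acc ++ (ps s).1, (ps s).2) := by
  intro s
  match s with
  | [] => intro acc; simp [ps]
  | [a] => intro acc; simp [ps, altStep]
  | a :: b :: r =>
    intro acc
    have ih := alt_step_lemma r (acc ++ [b, a])
    simp only [List.foldl_cons, altStep, ps]
    rw [ih]
    simp
termination_by s => s.length

theorem alt_eq_pairSwap : ∀ (s : List Int), inverte2a2_alt s = pairSwap s := by
  intro s
  unfold inverte2a2_alt
  rw [alt_step_lemma s []]
  match s with
  | [] => simp [ps, pairSwap]
  | [a] => simp [ps, pairSwap]
  | a :: b :: r =>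
    have ih := alt_eq_pairSwap r
    unfold inverte2a2_alt at ih
    rw [alt_step_lemma r []] at ih
    simp only [ps, pairSwap, List.nil_append] at *
    cases hp : (ps r).2 <;> simp [hp] at ih <;> simp [ih]
termination_by s => s.length

-- ===== VERDICT (by name: the statement is the Claim_ definition above) =====
theorem inverte2a2_spec : Claim_equal_inverte2a2 := by
  intro seq _
  unfold Spec_inverte2a2 inverte2a2
  rw [alt_eq_pairSwap]
  by_cases h : seq.length % 2 = 0
  · have hc : ((seq.length : Int) % 2 == 0) = true := by simp; omega
    rw [if_pos hc, rangeA _ h, key]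
  · have hc : ((seq.length : Int) % 2 == 0) = false := by simp; omega
    rw [if_neg (by simp [hc]), rangeB _ (by omega), key]
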